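-- pv_equiv track=rewrite | github.com/uzhdag/pathpy | pathpy/Paths.py | getContainedPaths
-- ===== SOURCE A (Python) =====
-- def getContainedPaths(p, node_filter):
--     """
--     Returns the set of maximum-length sub-paths of the path p, which
--     only contain nodes that appear in the node_filter. As an example,
--     for the path (a,b,c,d,e,f,g) and a node_filter [a,b,d,f,g], the method
--     will return [(a,b), (d,), (f,g)].
--
--     @param p: a path tuple to check for contained paths
--     @param node_filter: a set of nodes to which the contained paths should be limited
--     """
--     contained_paths = []
--     current_path = ()
--     for k in range(0, len(p)):
--         if p[k] in node_filter:
--             current_path += (p[k],)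
--         else:
--             if current_path:
--                 contained_paths.append(current_path)
--                 current_path = ()
--     if current_path:
--         contained_paths.append(current_path)
--
--     return contained_paths
-- ===== SOURCE B (Python) =====
-- def getContainedPaths(p, node_filter):
--     """Staged boundary-detection reimplementation: build a membership mask,
--     locate run starts and run ends from the mask, then slice p at those
--     boundaries."""
--     inside = [x in node_filter for x in p]
--     prev = [False] + inside[:-1]
--     nxt = inside[1:] + [False]
--     starts = [i for i, (b, q) in enumerate(zip(inside, prev)) if b and not q]
--     ends = [i for i, (b, q) in enumerate(zip(inside, nxt)) if b and not q]
--     return [tuple(p[s:e + 1]) for s, e in zip(starts, ends)]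
-- ===== Notes on version B (the rewrite author's own statement) =====
-- stated objective: faster
-- what changed: Replaces A's single-pass accumulator loop (which grows current_path by tuple concatenation and flushes it in the else-branch and after the loop) by staged passes: build a membership mask, detect run-start and run-end boundary indices from the mask, then slice the path once at those boundaries.
import Mathlib
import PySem

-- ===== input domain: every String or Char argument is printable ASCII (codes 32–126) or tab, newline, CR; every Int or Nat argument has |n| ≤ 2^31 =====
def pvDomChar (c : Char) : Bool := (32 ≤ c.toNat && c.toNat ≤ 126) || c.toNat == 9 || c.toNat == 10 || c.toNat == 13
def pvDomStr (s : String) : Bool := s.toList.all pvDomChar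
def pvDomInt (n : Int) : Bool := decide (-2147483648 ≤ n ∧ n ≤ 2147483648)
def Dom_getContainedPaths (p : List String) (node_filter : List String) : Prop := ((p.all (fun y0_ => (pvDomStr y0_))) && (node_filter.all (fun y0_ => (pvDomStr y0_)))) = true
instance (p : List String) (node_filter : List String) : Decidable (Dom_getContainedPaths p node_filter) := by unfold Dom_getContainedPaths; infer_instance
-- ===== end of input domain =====

-- B replaces A's accumulator/flush loop by staged passes (membership mask, run-boundary indices, slices); a timing run measured B faster (A rebuilds current_path by tuple concatenation each step).


-- ===== PORT A =====
-- for-loop over p with (contained_paths, current_path) state, then the post-loop flush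
def getContainedPaths (p : List String) (node_filter : List String) : List (List String) :=
  let st := p.foldl
    (fun (st : List (List String) × List String) x =>
      if x ∈ node_filter then (st.1, st.2 ++ [x])
      else if st.2 ≠ [] then (st.1 ++ [st.2], []) else st)
    ([], [])
  if st.2 ≠ [] then st.1 ++ [st.2] else st.1

-- ===== PORT B =====
-- staged: membership mask, run-start indices, run-end indices, slices (Source B line for line)
def getContainedPaths_alt (p : List String) (node_filter : List String) : List (List String) :=
  let inside : List Bool := p.map (fun x => decide (x ∈ node_filter))
  let prev : List Bool := false :: PySem.List.slice inside none (some (-1))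
  let nxt : List Bool := PySem.List.slice inside (some 1) none ++ [false]
  let starts : List Int := ((PySem.List.enumerate (inside.zip prev) 0).filter (fun iq => iq.2.1 && !iq.2.2)).map (·.1)
  let ends : List Int := ((PySem.List.enumerate (inside.zip nxt) 0).filter (fun iq => iq.2.1 && !iq.2.2)).map (·.1)
  (starts.zip ends).map (fun se => PySem.List.slice p (some se.1) (some (se.2 + 1)))

-- ===== PRECONDITION & SPEC =====
def Spec_getContainedPaths (p : List String) (node_filter : List String) (out : List (List String)) : Prop := out = getContainedPaths_alt p node_filter
instance (p : List String) (node_filter : List String) (out : List (List String)) : Decidable (Spec_getContainedPaths p node_filter out) := by unfold Spec_getContainedPaths; infer_instance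

-- ===== CLAIM (what is proved, stated in full; the proofs are below) =====
def Claim_equal_getContainedPaths : Prop := ∀ (p : List String) (node_filter : List String), Dom_getContainedPaths p node_filter → Spec_getContainedPaths p node_filter (getContainedPaths p node_filter)

-- ===== LEMMAS AND PROOFS =====

-- common reference: the list of maximal runs of filter members
def gcpRuns (nf : List String) : List String → List (List String)
  | [] => []
  | x :: xs =>
    if x ∈ nf then
      (x :: xs.takeWhile (· ∈ nf)) :: gcpRuns nf (xs.dropWhile (· ∈ nf))
    else gcpRuns nf xs
termination_by l => l.length
decreasing_by
  · have := List.length_dropWhile_le (fun y => decide (y ∈ nf)) xs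
    simp at *; omega
  · simp

-- ---- A-side: A's loop equals gcpRuns ----
def gcpStep (nf : List String) (st : List (List String) × List String) (x : String) :
    List (List String) × List String :=
  if x ∈ nf then (st.1, st.2 ++ [x])
  else if st.2 ≠ [] then (st.1 ++ [st.2], []) else st

def gcpFinish (st : List (List String) × List String) : List (List String) :=
  if st.2 ≠ [] then st.1 ++ [st.2] else st.1

def gcpA (nf : List String) : List String → List String → List (List String)
  | cur, [] => if cur ≠ [] then [cur] else []
  | cur, x :: xs =>
    if x ∈ nf then gcpA nf (cur ++ [x]) xs
    else if cur ≠ [] then cur :: gcpA nf [] xs else gcpA nf [] xs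

lemma gcpA_foldl (nf : List String) (p : List String) :
    ∀ (acc : List (List String)) (cur : List String),
    gcpFinish (p.foldl (gcpStep nf) (acc, cur)) = acc ++ gcpA nf cur p := by
  induction p with
  | nil =>
      intro acc cur
      simp only [List.foldl_nil, gcpFinish, gcpA]
      split_ifs <;> simp
  | cons x xs ih =>
      intro acc cur
      simp only [List.foldl_cons]
      by_cases h1 : x ∈ nf
      · simp only [gcpStep, if_pos h1, gcpA]
        exact ih acc (cur ++ [x])
      · by_cases h2 : cur = []
        · simp only [gcpStep, if_neg h1, h2, gcpA]
          simpa using ih acc []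
        · simp only [gcpStep, if_neg h1, if_pos (show cur ≠ [] from h2), gcpA]
          rw [ih (acc ++ [cur]) []]
          simp

lemma gcpRuns_skip (nf : List String) (p : List String) :
    gcpRuns nf p =
      (if p.takeWhile (· ∈ nf) = [] then gcpRuns nf (p.dropWhile (· ∈ nf))
       else p.takeWhile (· ∈ nf) :: gcpRuns nf (p.dropWhile (· ∈ nf))) := by
  cases p with
  | nil => simp [gcpRuns]
  | cons x xs =>
      by_cases h : x ∈ nf
      · simp [gcpRuns, h]
      · simp [gcpRuns, h]

lemma gcpA_runs (nf : List String) (p : List String) :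
    ∀ cur : List String,
    gcpA nf cur p =
      (if cur ++ p.takeWhile (· ∈ nf) = [] then gcpRuns nf (p.dropWhile (· ∈ nf))
       else (cur ++ p.takeWhile (· ∈ nf)) :: gcpRuns nf (p.dropWhile (· ∈ nf))) := by
  induction p with
  | nil =>
      intro cur
      simp only [gcpA, List.takeWhile_nil, List.dropWhile_nil, List.append_nil, gcpRuns]
      split_ifs <;> simp_all
  | cons x xs ih =>
      intro cur
      by_cases h : x ∈ nf
      · simp only [gcpA, if_pos h]
        rw [ih (cur ++ [x])]
        simp [h]
      · have hr : gcpRuns nf (x :: xs) = gcpRuns nf xs := by simp [gcpRuns, h]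
        have hx : gcpA nf [] xs = gcpRuns nf xs := by
          rw [ih []]
          simp only [List.nil_append]
          exact (gcpRuns_skip nf xs).symm
        simp only [gcpA, if_neg h]
        have ht : (x :: xs).takeWhile (· ∈ nf) = [] := by simp [h]
        have hd : (x :: xs).dropWhile (· ∈ nf) = x :: xs := by simp [h]
        rw [ht, hd, hr, hx]
        split_ifs with hc <;> simp_all

lemma gcpA_eq_runs (nf : List String) (p : List String) :
    gcpA nf [] p = gcpRuns nf p := by
  rw [gcpA_runs nf p []]
  simp only [List.nil_append]
  exact (gcpRuns_skip nf p).symm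

lemma portA_eq_runs (nf : List String) (p : List String) :
    getContainedPaths p nf = gcpRuns nf p := by
  have h := gcpA_foldl nf p [] []
  rw [gcpA_eq_runs] at h
  have he : getContainedPaths p nf = gcpFinish (p.foldl (gcpStep nf) ([], [])) := rfl
  rw [he, h]
  rfl

-- ---- B-side: the staged index computation equals gcpRuns ----

-- mask paired with the previous / next mask value
def pairsPrev (q : Bool) : List Bool → List (Bool × Bool)
  | [] => []
  | b :: bs => (b, q) :: pairsPrev b bs

def pairsNext : List Bool → List (Bool × Bool)
  | [] => []
  | b :: bs => (b, bs.headD false) :: pairsNext bs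

-- indices (from base i) where the pair is (true, false)
def idxs (i : Int) : List (Bool × Bool) → List Int
  | [] => []
  | bq :: rest => if bq.1 && !bq.2 then i :: idxs (i + 1) rest else idxs (i + 1) rest

lemma idxs_cons_pos (i : Int) (bq : Bool × Bool) (rest : List (Bool × Bool))
    (h : (bq.1 && !bq.2) = true) : idxs i (bq :: rest) = i :: idxs (i + 1) rest := by
  simp [idxs, h]

lemma idxs_cons_neg (i : Int) (bq : Bool × Bool) (rest : List (Bool × Bool))
    (h : (bq.1 && !bq.2) = false) : idxs i (bq :: rest) = idxs (i + 1) rest := by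
  simp [idxs, h]

lemma zip_prev (l : List Bool) : ∀ q : Bool, l.zip (q :: l.dropLast) = pairsPrev q l := by
  induction l with
  | nil => intro q; simp [pairsPrev]
  | cons b bs ih =>
      intro q
      cases bs with
      | nil => simp [pairsPrev]
      | cons b2 bs' =>
          have h0 : (b :: b2 :: bs').zip (q :: (b :: b2 :: bs').dropLast)
              = (b, q) :: (b2 :: bs').zip (b :: (b2 :: bs').dropLast) := rfl
          rw [h0, ih b]
          rfl

lemma zip_next (l : List Bool) : l.zip (l.tail ++ [false]) = pairsNext l := by
  induction l with
  | nil => simp [pairsNext]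
  | cons b bs ih =>
      cases bs with
      | nil => simp [pairsNext]
      | cons b2 bs' =>
          have h0 : (b :: b2 :: bs').zip ((b :: b2 :: bs').tail ++ [false])
              = (b, b2) :: (b2 :: bs').zip ((b2 :: bs').tail ++ [false]) := rfl
          rw [h0, ih]
          rfl

lemma idxs_eq (l : List (Bool × Bool)) : ∀ i : Int,
    ((PySem.List.enumerate l i).filter (fun iq => iq.2.1 && !iq.2.2)).map (·.1) = idxs i l := by
  induction l with
  | nil => intro i; simp [PySem.List.enumerate_nil, idxs]
  | cons bq rest ih =>
      intro i
      rw [PySem.List.enumerate_cons]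
      by_cases h : (bq.1 && !bq.2) = true
      · simp [idxs, h, ih (i + 1)]
      · simp [idxs, h, ih (i + 1)]

lemma idxs_shift (l : List (Bool × Bool)) : ∀ (i j : Int),
    idxs (i + j) l = (idxs i l).map (· + j) := by
  induction l with
  | nil => intro i j; simp [idxs]
  | cons bq rest ih =>
      intro i j
      cases h : (bq.1 && !bq.2) with
      | false =>
          rw [idxs_cons_neg _ _ _ h, idxs_cons_neg _ _ _ h,
            show i + j + 1 = (i + 1) + j from by ring, ih]
      | true =>
          rw [idxs_cons_pos _ _ _ h, idxs_cons_pos _ _ _ h, List.map_cons,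
            show i + j + 1 = (i + 1) + j from by ring, ih]

lemma idxs_shift_one (l : List (Bool × Bool)) (i : Int) :
    idxs (i + 1) l = (idxs i l).map (· + 1) := idxs_shift l i 1

lemma idxs_mem_le (l : List (Bool × Bool)) : ∀ (i z : Int), z ∈ idxs i l → i ≤ z := by
  induction l with
  | nil => intro i z h; simp [idxs] at h
  | cons bq rest ih =>
      intro i z h
      cases hb : (bq.1 && !bq.2) with
      | false =>
          rw [idxs_cons_neg _ _ _ hb] at h
          have := ih (i + 1) z h; omega
      | true =>
          rw [idxs_cons_pos _ _ _ hb] at h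
          rcases List.mem_cons.mp h with h' | h'
          · omega
          · have := ih (i + 1) z h'; omega

lemma slice_cons_shift (x : String) (xs : List String) (s e : Int) (hs : 0 ≤ s) (he : 0 ≤ e) :
    PySem.List.slice (x :: xs) (some (s + 1)) (some (e + 1 + 1))
      = PySem.List.slice xs (some s) (some (e + 1)) := by
  rw [PySem.List.slice_toNat (a := s + 1) (b := e + 1 + 1) _ (by omega) (by omega),
      PySem.List.slice_toNat (a := s) (b := e + 1) _ (by omega) (by omega)]
  have h1 : (s + 1).toNat = s.toNat + 1 := by omega
  have h2 : (e + 1 + 1).toNat - (s + 1).toNat = (e + 1).toNat - s.toNat := by omega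
  rw [h2, h1, List.drop_succ_cons]

lemma shift_slices (x : String) (xs : List String) (a b : List Int)
    (ha : ∀ s ∈ a, 0 ≤ s) (hb : ∀ e ∈ b, 0 ≤ e) :
    ((a.map (· + 1)).zip (b.map (· + 1))).map
        (fun se => PySem.List.slice (x :: xs) (some se.1) (some (se.2 + 1)))
      = (a.zip b).map (fun se => PySem.List.slice xs (some se.1) (some (se.2 + 1))) := by
  rw [List.zip_map, List.map_map]
  apply List.map_congr_left
  intro se hse
  obtain ⟨s, e⟩ := se
  obtain ⟨h1, h2⟩ := List.of_mem_zip hse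
  have hs := ha s h1
  have he := hb e h2
  simp only [Function.comp, Prod.map]
  exact slice_cons_shift x xs s e hs he

-- B's result, written through the proof helpers
def bRes (nf : List String) (p : List String) : List (List String) :=
  ((idxs 0 (pairsPrev false (p.map (fun x => decide (x ∈ nf))))).zip
    (idxs 0 (pairsNext (p.map (fun x => decide (x ∈ nf)))))).map
    (fun se => PySem.List.slice p (some se.1) (some (se.2 + 1)))

lemma portB_eq_bRes (p nf : List String) : getContainedPaths_alt p nf = bRes nf p := by
  unfold getContainedPaths_alt bRes
  simp only [PySem.List.slice_to_neg_one, PySem.List.slice_from_one, zip_prev, zip_next, idxs_eq]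

lemma ends_ne_nil (m : List Bool) : ∀ i : Int, idxs i (pairsNext (true :: m)) ≠ [] := by
  induction m with
  | nil => intro i; simp [pairsNext, idxs]
  | cons b2 m' ih =>
      intro i
      cases hb : b2 with
      | false => simp [pairsNext, idxs]
      | true =>
          have h2 : pairsNext (true :: true :: m') = (true, true) :: pairsNext (true :: m') := by
            simp [pairsNext]
          rw [h2, idxs_cons_neg _ _ _ (by simp)]
          exact ih (i + 1)

lemma bRes_eq_runs (nf : List String) (p : List String) : bRes nf p = gcpRuns nf p := by
  induction p with
  | nil => simp [bRes, pairsPrev, pairsNext, idxs, gcpRuns]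
  | cons x xs ih =>
      by_cases hx : x ∈ nf
      · cases xs with
        | nil =>
            simp [bRes, pairsPrev, pairsNext, idxs, hx, gcpRuns, PySem.List.slice_to]
        | cons y ys =>
            by_cases hy : y ∈ nf
            · -- extend the first run of xs by x
              set m'' := ys.map (fun z => decide (z ∈ nf)) with hm''
              have hm : (x :: y :: ys).map (fun z => decide (z ∈ nf))
                  = true :: true :: m'' := by rw [hm'']; simp [hx, hy]
              have hmx : (y :: ys).map (fun z => decide (z ∈ nf)) = true :: m'' := by
                rw [hm'']; simp [hy]
              have hsp : idxs 0 (pairsPrev false (true :: true :: m''))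
                  = 0 :: idxs 2 (pairsPrev true m'') := by
                simp [pairsPrev, idxs]
              have hsx : idxs 0 (pairsPrev false (true :: m''))
                  = 0 :: idxs 1 (pairsPrev true m'') := by
                simp [pairsPrev, idxs]
              have hep : idxs 0 (pairsNext (true :: true :: m''))
                  = idxs 1 (pairsNext (true :: m'')) := by
                have h2 : pairsNext (true :: true :: m'')
                    = (true, true) :: pairsNext (true :: m'') := by simp [pairsNext]
                rw [h2, idxs_cons_neg _ _ _ (by simp)]
                norm_num
              obtain ⟨e0, E, hE⟩ : ∃ e0 E, idxs 0 (pairsNext (true :: m'')) = e0 :: E := by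
                rcases h : idxs 0 (pairsNext (true :: m'')) with _ | ⟨e0, E⟩
                · exact absurd h (ends_ne_nil m'' 0)
                · exact ⟨e0, E, rfl⟩
              have he0 : 0 ≤ e0 := idxs_mem_le _ 0 e0 (by rw [hE]; simp)
              have hEmem : ∀ e ∈ E, 0 ≤ e := fun e he =>
                idxs_mem_le _ 0 e (by rw [hE]; simp [he])
              have hSmem : ∀ s ∈ idxs 1 (pairsPrev true m''), 0 ≤ s := fun s hs => by
                have := idxs_mem_le _ 1 s hs; omega
              have hx2 : idxs 2 (pairsPrev true m'')
                  = (idxs 1 (pairsPrev true m'')).map (· + 1) := by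
                have h := idxs_shift_one (pairsPrev true m'') 1
                norm_num at h
                exact h
              have hxe : idxs 1 (pairsNext (true :: m''))
                  = (idxs 0 (pairsNext (true :: m''))).map (· + 1) := by
                have h := idxs_shift_one (pairsNext (true :: m'')) 0
                norm_num at h
                exact h
              have hbx : bRes nf (x :: y :: ys)
                  = (PySem.List.slice (x :: y :: ys) (some 0) (some (e0 + 1 + 1))) ::
                    (((idxs 1 (pairsPrev true m'')).map (· + 1)).zip (E.map (· + 1))).map
                      (fun se => PySem.List.slice (x :: y :: ys) (some se.1) (some (se.2 + 1))) := by
                unfold bRes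
                rw [hm, hsp, hep, hxe, hE, hx2]
                simp [List.zip_cons_cons]
              have hbxs : bRes nf (y :: ys)
                  = (PySem.List.slice (y :: ys) (some 0) (some (e0 + 1))) ::
                    ((idxs 1 (pairsPrev true m'')).zip E).map
                      (fun se => PySem.List.slice (y :: ys) (some se.1) (some (se.2 + 1))) := by
                unfold bRes
                rw [hmx, hsx, hE]
                simp [List.zip_cons_cons]
              have hhead : PySem.List.slice (x :: y :: ys) (some (0 : Int)) (some (e0 + 1 + 1))
                  = x :: PySem.List.slice (y :: ys) (some (0 : Int)) (some (e0 + 1)) := by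
                rw [PySem.List.slice_toNat (a := 0) (b := e0 + 1 + 1) _ (by omega) (by omega),
                    PySem.List.slice_toNat (a := 0) (b := e0 + 1) _ (by omega) (by omega)]
                have h1 : (e0 + 1 + 1).toNat = (e0 + 1).toNat + 1 := by omega
                simp [h1]
              have htail := shift_slices x (y :: ys) (idxs 1 (pairsPrev true m'')) E hSmem hEmem
              have hruns_p : gcpRuns nf (x :: y :: ys)
                  = (x :: y :: ys.takeWhile (· ∈ nf)) :: gcpRuns nf (ys.dropWhile (· ∈ nf)) := by
                simp [gcpRuns, hx, hy]
              have hruns_xs : gcpRuns nf (y :: ys)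
                  = (y :: ys.takeWhile (· ∈ nf)) :: gcpRuns nf (ys.dropWhile (· ∈ nf)) := by
                simp [gcpRuns, hy]
              rw [hbxs, hruns_xs] at ih
              injection ih with h1 h2
              rw [hbx, hhead, htail, hruns_p, h1, h2]
            · -- x starts a fresh singleton run
              set m'' := ys.map (fun z => decide (z ∈ nf)) with hm''
              have hm : (x :: y :: ys).map (fun z => decide (z ∈ nf))
                  = true :: false :: m'' := by rw [hm'']; simp [hx, hy]
              have hmx : (y :: ys).map (fun z => decide (z ∈ nf)) = false :: m'' := by
                rw [hm'']; simp [hy]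
              have hsp : idxs 0 (pairsPrev false (true :: false :: m''))
                  = 0 :: idxs 2 (pairsPrev false m'') := by
                simp [pairsPrev, idxs]
              have hsx : idxs 0 (pairsPrev false (false :: m''))
                  = idxs 1 (pairsPrev false m'') := by
                simp [pairsPrev, idxs]
              have hep : idxs 0 (pairsNext (true :: false :: m''))
                  = 0 :: idxs 2 (pairsNext m'') := by
                simp [pairsNext, idxs]
              have hex : idxs 0 (pairsNext (false :: m''))
                  = idxs 1 (pairsNext m'') := by
                simp [pairsNext, idxs]
              have hx2 : idxs 2 (pairsPrev false m'')
                  = (idxs 1 (pairsPrev false m'')).map (· + 1) := by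
                have h := idxs_shift_one (pairsPrev false m'') 1
                norm_num at h
                exact h
              have he2 : idxs 2 (pairsNext m'') = (idxs 1 (pairsNext m'')).map (· + 1) := by
                have h := idxs_shift_one (pairsNext m'') 1
                norm_num at h
                exact h
              have hSmem : ∀ s ∈ idxs 1 (pairsPrev false m''), 0 ≤ s := fun s hs => by
                have := idxs_mem_le _ 1 s hs; omega
              have hEmem : ∀ e ∈ idxs 1 (pairsNext m''), 0 ≤ e := fun e he => by
                have := idxs_mem_le _ 1 e he; omega
              have hhead : PySem.List.slice (x :: y :: ys) (some (0 : Int)) (some ((0 : Int) + 1))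
                  = [x] := by
                rw [PySem.List.slice_toNat (a := 0) (b := 0 + 1) _ (by omega) (by omega)]
                simp
              have hbx : bRes nf (x :: y :: ys)
                  = [x] ::
                    (((idxs 1 (pairsPrev false m'')).map (· + 1)).zip
                      ((idxs 1 (pairsNext m'')).map (· + 1))).map
                      (fun se => PySem.List.slice (x :: y :: ys) (some se.1) (some (se.2 + 1))) := by
                unfold bRes
                rw [hm, hsp, hep, hx2, he2]
                simp only [List.zip_cons_cons, List.map_cons, hhead]
              have hbxs : bRes nf (y :: ys)
                  = ((idxs 1 (pairsPrev false m'')).zip (idxs 1 (pairsNext m''))).map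
                      (fun se => PySem.List.slice (y :: ys) (some se.1) (some (se.2 + 1))) := by
                unfold bRes
                rw [hmx, hsx, hex]
              have htail := shift_slices x (y :: ys) (idxs 1 (pairsPrev false m''))
                (idxs 1 (pairsNext m'')) hSmem hEmem
              have hruns_p : gcpRuns nf (x :: y :: ys) = [x] :: gcpRuns nf (y :: ys) := by
                simp [gcpRuns, hx, hy]
              rw [hbx, htail, ← hbxs, ih, hruns_p]
      · -- x is skipped
        set m' := xs.map (fun z => decide (z ∈ nf)) with hm'
        have hm : (x :: xs).map (fun z => decide (z ∈ nf)) = false :: m' := by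
          rw [hm']; simp [hx]
        have hsp : idxs 0 (pairsPrev false (false :: m')) = idxs 1 (pairsPrev false m') := by
          simp [pairsPrev, idxs]
        have hep : idxs 0 (pairsNext (false :: m')) = idxs 1 (pairsNext m') := by
          simp [pairsNext, idxs]
        have hx1 : idxs 1 (pairsPrev false m') = (idxs 0 (pairsPrev false m')).map (· + 1) := by
          have h := idxs_shift_one (pairsPrev false m') 0
          norm_num at h
          exact h
        have he1 : idxs 1 (pairsNext m') = (idxs 0 (pairsNext m')).map (· + 1) := by
          have h := idxs_shift_one (pairsNext m') 0
          norm_num at h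
          exact h
        have hSmem : ∀ s ∈ idxs 0 (pairsPrev false m'), 0 ≤ s := fun s hs =>
          idxs_mem_le _ 0 s hs
        have hEmem : ∀ e ∈ idxs 0 (pairsNext m'), 0 ≤ e := fun e he =>
          idxs_mem_le _ 0 e he
        have hbx : bRes nf (x :: xs)
            = (((idxs 0 (pairsPrev false m')).map (· + 1)).zip
                ((idxs 0 (pairsNext m')).map (· + 1))).map
                (fun se => PySem.List.slice (x :: xs) (some se.1) (some (se.2 + 1))) := by
          unfold bRes
          rw [hm, hsp, hep, hx1, he1]
        have htail := shift_slices x xs (idxs 0 (pairsPrev false m'))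
          (idxs 0 (pairsNext m')) hSmem hEmem
        have hruns : gcpRuns nf (x :: xs) = gcpRuns nf xs := by
          simp [gcpRuns, hx]
        rw [hbx, htail, hruns, ← ih]
        rfl

-- ===== VERDICT (by name: the statement is the Claim_ definition above) =====
theorem getContainedPaths_spec : Claim_equal_getContainedPaths := by
  intro p nf _
  show getContainedPaths p nf = getContainedPaths_alt p nf
  rw [portA_eq_runs, portB_eq_bRes, bRes_eq_runs]
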